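-- pv_equiv track=rewrite | github.com/ErnirEli/Linuleg | Skil 1/template_01.py | image
-- ===== SOURCE A (Python) =====
-- def image(f, D):
--
--     f: dict
--     D: set
--
--     images = []
--     for _input, _output in f.values():
--         if _input in D:
--             images.append(_output)
--
--     return set(images)
-- ===== SOURCE B (Python) =====
-- def image(f, D):
--     pairs = list(f.values())
--
--     def solve(lo, hi):
--         if hi - lo == 0:
--             return set()
--         if hi - lo == 1:
--             _input, _output = pairs[lo]
--             return {_output} if _input in D else set()
--         mid = (lo + hi) // 2
--         return solve(lo, mid) | solve(mid, hi)
--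
--     return solve(0, len(pairs))
-- ===== Notes on version B (the rewrite author's own statement) =====
-- stated objective: alternative
-- what changed: B computes the image by divide and conquer: it splits the list of (input, output) pairs in half, solves each half recursively (singleton base case), and takes the union of the two half-results, instead of A's single left-to-right scan with an appended list converted to a set at the end.
import Mathlib
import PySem

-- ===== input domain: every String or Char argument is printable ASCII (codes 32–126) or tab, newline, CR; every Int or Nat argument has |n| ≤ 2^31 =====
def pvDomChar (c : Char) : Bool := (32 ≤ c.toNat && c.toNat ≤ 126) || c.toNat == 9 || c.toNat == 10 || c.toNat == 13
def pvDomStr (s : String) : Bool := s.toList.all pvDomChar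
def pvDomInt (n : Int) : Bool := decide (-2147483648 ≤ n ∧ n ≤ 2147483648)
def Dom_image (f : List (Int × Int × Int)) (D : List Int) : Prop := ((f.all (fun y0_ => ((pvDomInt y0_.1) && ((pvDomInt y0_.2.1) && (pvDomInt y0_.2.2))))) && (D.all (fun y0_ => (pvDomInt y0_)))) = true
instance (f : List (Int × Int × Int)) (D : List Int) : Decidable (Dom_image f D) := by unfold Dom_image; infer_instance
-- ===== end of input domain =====

-- B replaces A's single left-to-right filtering scan by a divide-and-conquer recursion
-- (split the pair list in half, union the half-results); objective: alternative.

-- ===== PORT A =====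
-- images = []; for _input, _output in f.values(): if _input in D: images.append(_output); return set(images)
def image (f : List (Int × Int × Int)) (D : List Int) : List Int :=
  let images : List Int :=
    (PySem.Dict.values (PySem.Dict.ofList f)).foldl
      (fun images p => if PySem.Set.contains D p.1 then images ++ [p.2] else images) []
  PySem.Set.ofList images

-- ===== PORT B =====
-- def solve(lo, hi): recursion over an index range of `pairs`; ported as the same
-- recursion over the corresponding sublist (take/drop at mid = len // 2).
def imageSolve (D : List Int) (ps : List (Int × Int)) : List Int :=
  match ps with
  | [] => PySem.Set.empty
  | [p] => if PySem.Set.contains D p.1 then PySem.Set.add PySem.Set.empty p.2 else PySem.Set.empty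
  | a :: b :: rest =>
      let ps' := a :: b :: rest
      let mid := ps'.length / 2
      PySem.Set.union (imageSolve D (ps'.take mid)) (imageSolve D (ps'.drop mid))
termination_by ps.length
decreasing_by
  · simp [List.length_take]; omega
  · simp [List.length_drop]; omega

def image_alt (f : List (Int × Int × Int)) (D : List Int) : List Int :=
  let pairs := PySem.Dict.values (PySem.Dict.ofList f)
  imageSolve D pairs

-- ===== PRECONDITION & SPEC =====
def Spec_image (f : List (Int × Int × Int)) (D : List Int) (out : List Int) : Prop := out = image_alt f D
instance (f : List (Int × Int × Int)) (D : List Int) (out : List Int) : Decidable (Spec_image f D out) := by unfold Spec_image; infer_instance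

-- ===== CLAIM (what is proved, stated in full; the proofs are below) =====
def Claim_equal_image : Prop := ∀ (f : List (Int × Int × Int)) (D : List Int), Dom_image f D → Spec_image f D (image f D)

-- ===== LEMMAS AND PROOFS =====

-- membership in the seed is preserved by folding Set.add
theorem mem_foldl_add (v : List Int) (s : List Int) (x : Int) (hx : x ∈ s) :
    x ∈ v.foldl PySem.Set.add s := by
  induction v generalizing s with
  | nil => exact hx
  | cons a v ih =>
    exact ih _ ((PySem.Set.mem_add _ _ _).mpr (Or.inl hx))

-- every folded-in element is a member of the result
theorem mem_foldl_add_list (v : List Int) (s : List Int) (x : Int) (hx : x ∈ v) :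
    x ∈ v.foldl PySem.Set.add s := by
  induction v generalizing s with
  | nil => cases hx
  | cons a v ih =>
    rcases List.mem_cons.mp hx with h | h
    · exact mem_foldl_add v _ x ((PySem.Set.mem_add _ _ _).mpr (Or.inr h))
    · exact ih _ h

-- folding over a set already folded in is the same as folding the raw list
theorem foldl_add_foldl (v : List Int) (s w : List Int) :
    List.foldl PySem.Set.add s (List.foldl PySem.Set.add w v)
      = List.foldl PySem.Set.add (List.foldl PySem.Set.add s w) v := by
  induction v generalizing w with
  | nil => rfl
  | cons a v ih =>
    simp only [List.foldl_cons]
    rw [ih (PySem.Set.add w a)]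
    congr 1
    by_cases h : a ∈ w
    · have hw : PySem.Set.add w a = w := by
        simp [PySem.Set.add, PySem.Set.contains, List.contains_eq_mem, h]
      have hs : a ∈ List.foldl PySem.Set.add s w := mem_foldl_add_list w s a h
      rw [hw]
      simp [PySem.Set.add, PySem.Set.contains, List.contains_eq_mem, hs]
    · have hw : PySem.Set.add w a = w ++ [a] := by
        simp [PySem.Set.add, PySem.Set.contains, List.contains_eq_mem, h]
      rw [hw, List.foldl_append]
      rfl

-- ofList distributes over append as a union (with union = foldl add)
theorem ofList_append (u v : List Int) :
    PySem.Set.ofList (u ++ v)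
      = PySem.Set.union (PySem.Set.ofList u) (PySem.Set.ofList v) := by
  show List.foldl PySem.Set.add [] (u ++ v)
      = List.foldl PySem.Set.add (List.foldl PySem.Set.add [] u) (List.foldl PySem.Set.add [] v)
  rw [List.foldl_append, foldl_add_foldl, List.foldl_nil]

-- A's result on a list of pairs, written as a filter-map
def aScan (D : List Int) (ps : List (Int × Int)) : List Int :=
  (ps.filter (fun p => PySem.Set.contains D p.1)).map Prod.snd

-- the divide-and-conquer solve equals set(A's filtered outputs)
theorem imageSolve_eq (D : List Int) (ps : List (Int × Int)) :
    imageSolve D ps = PySem.Set.ofList (aScan D ps) := by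
  fun_induction imageSolve D ps with
  | case1 => rfl
  | case2 p h =>
    have hm : p.1 ∈ D := by simpa [PySem.Set.contains, List.contains_eq_mem] using h
    have ha : aScan D [p] = [p.2] := by
      simp [aScan, List.filter_cons, PySem.Set.contains, List.contains_eq_mem, hm]
    rw [ha]; rfl
  | case3 p h =>
    have hm : p.1 ∉ D := by simpa [PySem.Set.contains, List.contains_eq_mem] using h
    have ha : aScan D [p] = [] := by
      simp [aScan, List.filter_cons, PySem.Set.contains, List.contains_eq_mem, hm]
    rw [ha]; rfl
  | case4 a b rest ps mid h2 h1 =>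
    rw [h1, h2, ← ofList_append]
    congr 1
    unfold aScan
    rw [← List.map_append, ← List.filter_append, List.take_append_drop]

-- ===== VERDICT (by name: the statement is the Claim_ definition above) =====
theorem image_spec : Claim_equal_image := by
  intro f D _
  unfold Spec_image image image_alt
  rw [PySem.List.foldl_append_if, imageSolve_eq]
  rfl
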